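-- pv_equiv track=rewrite | github.com/autwk/TA_FYA | TA_F6.py | generate_nfa_strings
-- ===== SOURCE A (Python) =====
-- def generate_nfa_strings(F, transitions, max_length):
--     # Создаем словарь для переходной функции
--     transition_dict = {}
--     for (state_from, symbol, state_to) in transitions:
--         if state_from not in transition_dict:
--             transition_dict[state_from] = {}
--         if symbol not in transition_dict[state_from]:
--             transition_dict[state_from][symbol] = set()
--         transition_dict[state_from][symbol].add(state_to)
--
--     # Функция для генерации строк
--     def explore(states, current_string, length):
--         if length > max_length:
--             return
--
--         # Если одно из текущих состояний финальное, добавляем строку в язык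
--         if any(state in F for state in states):
--             language.add(current_string)
--
--         # Исследуем все возможные переходы из текущих состояний
--         for state in states:
--             if state in transition_dict:
--                 for symbol, next_states in transition_dict[state].items():
--                     for next_state in next_states:
--                         explore([next_state], current_string + symbol, length + 1)
--
--     language = set()
--     # Начинаем с начального состояния (предположим, что это k1)
--     start_state = 'k1'
--     explore([start_state], '', 0)
--
--     return language
-- ===== SOURCE B (Python) =====
-- def generate_nfa_strings(F, transitions, max_length):
--     # Memoized DFS: each (prefix, state, depth) configuration is explored at most once.
--     transition_dict = {}
--     for (state_from, symbol, state_to) in transitions: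
--         transition_dict.setdefault(state_from, {}).setdefault(symbol, set()).add(state_to)
--
--     F_set = set(F)
--     language = set()
--     visited = set()
--
--     def explore(state, current_string, length):
--         if length > max_length or (current_string, state, length) in visited:
--             return
--         visited.add((current_string, state, length))
--         if state in F_set:
--             language.add(current_string)
--         for symbol, next_states in transition_dict.get(state, {}).items():
--             for next_state in next_states:
--                 explore(next_state, current_string + symbol, length + 1)
--
--     explore('k1', '', 0)
--     return language
-- ===== Notes on version B (the rewrite author's own statement) =====
-- stated objective: alternative
-- what changed: A enumerates every accepting path of the NFA by plain recursive search; B runs a memoized DFS over (prefix, state, depth) configurations with a visited set, so each configuration is explored at most once, and builds the transition table with setdefault.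
import Mathlib
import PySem

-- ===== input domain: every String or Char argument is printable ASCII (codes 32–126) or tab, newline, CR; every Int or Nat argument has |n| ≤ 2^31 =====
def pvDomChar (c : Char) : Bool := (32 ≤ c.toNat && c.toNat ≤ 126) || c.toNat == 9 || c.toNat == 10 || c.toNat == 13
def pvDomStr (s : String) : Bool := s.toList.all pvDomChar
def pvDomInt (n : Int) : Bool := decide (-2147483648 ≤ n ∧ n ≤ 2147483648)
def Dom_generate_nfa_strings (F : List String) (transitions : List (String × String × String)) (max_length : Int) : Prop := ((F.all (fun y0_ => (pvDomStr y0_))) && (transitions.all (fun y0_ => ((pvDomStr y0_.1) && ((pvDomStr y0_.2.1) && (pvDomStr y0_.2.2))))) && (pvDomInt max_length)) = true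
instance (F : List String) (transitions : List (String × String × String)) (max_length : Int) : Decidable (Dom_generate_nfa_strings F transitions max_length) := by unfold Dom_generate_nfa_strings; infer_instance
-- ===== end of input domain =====

-- B replaces A's path-by-path enumeration with a memoized DFS over (prefix, state, depth)
-- configurations (a visited set), exploring each configuration at most once (objective: alternative).


-- ===== PORT A =====
-- transition-table type: state ↦ (symbol ↦ set of successor states)
abbrev pvTD := PySem.Dict String (PySem.Dict String (PySem.Set String))

-- A's `for (state_from, symbol, state_to) in transitions` loop (two `not in` guards, then add)
def pvBuildA (transitions : List (String × String × String)) : pvTD :=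
  transitions.foldl (fun td t =>
    let td := if !td.contains t.1 then td.insert t.1 PySem.Dict.empty else td
    let td := td.modify t.1 PySem.Dict.empty (fun m =>
      if !m.contains t.2.1 then m.insert t.2.1 PySem.Set.empty else m)
    td.modify t.1 PySem.Dict.empty (fun m =>
      m.modify t.2.1 PySem.Set.empty (fun ns => PySem.Set.add ns t.2.2))) PySem.Dict.empty

-- A's recursive `explore(states, current_string, length)`; the fuel parameter is the obvious
-- structural encoding of the depth-bounded recursion (length grows by 1 each call, cut off at
-- max_length, so the initial fuel below is never exhausted before the `length > max_length` guard)
def pvExploreA (F : List String) (td : pvTD) (max_length : Int) :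
    Nat → List String → String → Int → PySem.Set String → PySem.Set String
  | 0, _, _, _, lang => lang
  | fuel + 1, states, cur, len, lang =>
    if len > max_length then lang
    else
      let lang := if states.any (fun st => F.contains st) then PySem.Set.add lang cur else lang
      states.foldl (fun lang st =>
        match td.get? st with
        | none => lang
        | some m =>
          m.items.foldl (fun lang sn =>
            sn.2.foldl (fun lang n =>
              pvExploreA F td max_length fuel [n] (cur ++ sn.1) (len + 1) lang) lang) lang) lang

def generate_nfa_strings (F : List String) (transitions : List (String × String × String)) (max_length : Int) : List String :=
  pvExploreA F (pvBuildA transitions) max_length ((max_length + 1).toNat + 1) ["k1"] "" 0 PySem.Set.empty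

-- ===== PORT B =====
-- B's build loop: setdefault / setdefault / add
def pvBuildB (transitions : List (String × String × String)) : pvTD :=
  transitions.foldl (fun td t =>
    let m := td.getD t.1 PySem.Dict.empty
    let ns := m.getD t.2.1 PySem.Set.empty
    td.insert t.1 (m.insert t.2.1 (PySem.Set.add ns t.2.2))) PySem.Dict.empty

-- B's `explore(state, current_string, length)` threading (language, visited); same fuel encoding
def pvExploreB (Fs : PySem.Set String) (td : pvTD) (max_length : Int) :
    Nat → String → String → Int → PySem.Set String × PySem.Set (String × String × Int) →
    PySem.Set String × PySem.Set (String × String × Int)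
  | 0, _, _, _, acc => acc
  | fuel + 1, st, cur, len, (lang, vis) =>
    if len > max_length || PySem.Set.contains vis (cur, st, len) then (lang, vis)
    else
      let vis := PySem.Set.add vis (cur, st, len)
      let lang := if PySem.Set.contains Fs st then PySem.Set.add lang cur else lang
      (td.getD st PySem.Dict.empty).items.foldl (fun acc sn =>
        sn.2.foldl (fun acc n =>
          pvExploreB Fs td max_length fuel n (cur ++ sn.1) (len + 1) acc) acc) (lang, vis)

def generate_nfa_strings_alt (F : List String) (transitions : List (String × String × String)) (max_length : Int) : List String :=
  (pvExploreB (PySem.Set.ofList F) (pvBuildB transitions) max_length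
    ((max_length + 1).toNat + 1) "k1" "" 0 (PySem.Set.empty, PySem.Set.empty)).1

-- ===== PRECONDITION & SPEC =====
def Spec_generate_nfa_strings (F : List String) (transitions : List (String × String × String)) (max_length : Int) (out : List String) : Prop := out = generate_nfa_strings_alt F transitions max_length
instance (F : List String) (transitions : List (String × String × String)) (max_length : Int) (out : List String) : Decidable (Spec_generate_nfa_strings F transitions max_length out) := by unfold Spec_generate_nfa_strings; infer_instance

-- ===== CLAIM (what is proved, stated in full; the proofs are below) =====
def Claim_equal_generate_nfa_strings : Prop := ∀ (F : List String) (transitions : List (String × String × String)) (max_length : Int), Dom_generate_nfa_strings F transitions max_length → Spec_generate_nfa_strings F transitions max_length (generate_nfa_strings F transitions max_length)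

-- ===== LEMMAS AND PROOFS =====

theorem pvDict_fst_ne_of_not_contains {κ ν : Type} [BEq κ] [LawfulBEq κ]
    (d : PySem.Dict κ ν) (k : κ) (h : d.contains k = false) :
    ∀ p ∈ d.items, (p.1 == k) = false := by
  intro p hp
  by_contra hc
  have hpk : p.1 = k := eq_of_beq (by simpa using hc)
  have hk : k ∈ d.keys := by
    simp only [PySem.Dict.keys, List.mem_map]
    exact ⟨p, hp, hpk⟩
  rw [← PySem.Dict.contains_iff_mem_keys] at hk
  simp [h] at hk

theorem pvDict_insert_insert_self {κ ν : Type} [BEq κ] [LawfulBEq κ]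
    (d : PySem.Dict κ ν) (k : κ) (v w : ν) :
    (d.insert k v).insert k w = d.insert k w := by
  apply PySem.Dict.ext
  have hc : (d.insert k v).contains k = true := PySem.Dict.contains_insert_self d k v
  by_cases h : d.contains k = true
  · rw [PySem.Dict.items_insert_of_contains _ _ hc,
        PySem.Dict.items_insert_of_contains _ _ h,
        PySem.Dict.items_insert_of_contains _ _ h, List.map_map]
    apply List.map_congr_left
    intro p _
    by_cases hp : (p.1 == k) = true <;> simp [hp]
  · have h' : d.contains k = false := by simpa using h
    rw [PySem.Dict.items_insert_of_contains _ _ hc,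
        PySem.Dict.items_insert_of_not_contains _ _ h',
        PySem.Dict.items_insert_of_not_contains _ _ h']
    rw [List.map_append]
    congr 1
    · conv_rhs => rw [← List.map_id d.items]
      apply List.map_congr_left
      intro p hp
      simp [pvDict_fst_ne_of_not_contains d k h' p hp]
    · simp

theorem pvStep_eq (td : pvTD) (t : String × String × String) :
    (let td' := if !td.contains t.1 then td.insert t.1 PySem.Dict.empty else td
     let td'' := td'.modify t.1 PySem.Dict.empty (fun m =>
       if !m.contains t.2.1 then m.insert t.2.1 PySem.Set.empty else m)
     td''.modify t.1 PySem.Dict.empty (fun m =>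
       m.modify t.2.1 PySem.Set.empty (fun ns => PySem.Set.add ns t.2.2)))
    = (let m := td.getD t.1 PySem.Dict.empty
       let ns := m.getD t.2.1 PySem.Set.empty
       td.insert t.1 (m.insert t.2.1 (PySem.Set.add ns t.2.2))) := by
  obtain ⟨a, s, b⟩ := t
  simp only [PySem.Dict.modify]
  by_cases hca : td.contains a = true
  · simp only [hca, Bool.not_true, Bool.false_eq_true, if_false]
    rw [PySem.Dict.getD_insert_self, pvDict_insert_insert_self]
    by_cases hcs : (td.getD a PySem.Dict.empty).contains s = true
    · rw [if_neg (by simp [hcs])]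
    · have hcs' : (td.getD a PySem.Dict.empty).contains s = false := by simpa using hcs
      rw [if_pos (by simp [hcs'])]
      rw [PySem.Dict.getD_insert_self, pvDict_insert_insert_self,
          PySem.Dict.getD_of_not_contains _ _ hcs']
  · have hca' : td.contains a = false := by simpa using hca
    rw [if_pos (by simp [hca'])]
    rw [PySem.Dict.getD_insert_self, pvDict_insert_insert_self,
        PySem.Dict.getD_insert_self, pvDict_insert_insert_self,
        PySem.Dict.getD_of_not_contains _ _ hca']
    rw [if_pos (by simp [PySem.Dict.contains_empty]), PySem.Dict.getD_insert_self,
        pvDict_insert_insert_self, PySem.Dict.getD_empty]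

def pvAddList (L : PySem.Set String) (xs : List String) : PySem.Set String :=
  xs.foldl PySem.Set.add L

theorem pvAddList_append (L : PySem.Set String) (xs ys : List String) :
    pvAddList L (xs ++ ys) = pvAddList (pvAddList L xs) ys := by
  simp [pvAddList, List.foldl_append]

theorem pvFoldl_addList_flatMap {α : Type} (g : α → List String) (xs : List α)
    (L : PySem.Set String) :
    xs.foldl (fun L x => pvAddList L (g x)) L = pvAddList L (xs.flatMap g) := by
  induction xs generalizing L with
  | nil => rfl
  | cons y ys ih => simp [List.foldl, ih, pvAddList_append]

theorem pvFoldl_eq_addList_flatMap {α : Type} (f : PySem.Set String → α → PySem.Set String)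
    (g : α → List String) (xs : List α) (acc : PySem.Set String)
    (h : ∀ acc x, x ∈ xs → f acc x = pvAddList acc (g x)) :
    xs.foldl f acc = pvAddList acc (xs.flatMap g) :=
  (PySem.List.foldl_congr_mem xs f (fun acc x => pvAddList acc (g x)) acc h).trans (pvFoldl_addList_flatMap g xs acc)

def pvTrace (F : List String) (td : pvTD) (ml : Int) (st cur : String) (len : Int) : List String :=
  if _h : len > ml then []
  else
    (if F.contains st then [cur] else []) ++
      (match td.get? st with
       | none => []
       | some m =>
         m.items.flatMap (fun sn =>
           sn.2.flatMap (fun n => pvTrace F td ml n (cur ++ sn.1) (len + 1))))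
termination_by (ml + 1 - len).toNat
decreasing_by simp_wf; omega

theorem pvA_eq_trace (F : List String) (td : pvTD) (ml : Int) :
    ∀ (fuel : Nat) (st cur : String) (len : Int) (L : PySem.Set String),
      (ml + 1 - len).toNat ≤ fuel →
      pvExploreA F td ml fuel [st] cur len L = pvAddList L (pvTrace F td ml st cur len) := by
  intro fuel
  induction fuel with
  | zero =>
    intro st cur len L h
    have hlen : len > ml := by omega
    rw [pvTrace, dif_pos hlen]
    rfl
  | succ fuel ih =>
    intro st cur len L h
    by_cases hlen : len > ml
    · rw [pvTrace, dif_pos hlen]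
      simp [pvExploreA, hlen, pvAddList]
    · rw [pvTrace, dif_neg hlen, pvAddList_append]
      have hfu : (ml + 1 - (len + 1)).toNat ≤ fuel := by omega
      simp only [pvExploreA, if_neg hlen, List.any_cons, List.any_nil, Bool.or_false,
        List.foldl_cons, List.foldl_nil]
      have hfirst : ∀ (c : Prop) (_ : Decidable c) (L : PySem.Set String),
          (if c then PySem.Set.add L cur else L) = pvAddList L (if c then [cur] else []) := by
        intro c _ L
        split_ifs <;> simp [pvAddList]
      rw [hfirst]
      cases hget : td.get? st with
      | none => dsimp only; simp [pvAddList]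
      | some m =>
        dsimp only
        refine pvFoldl_eq_addList_flatMap _ _ _ _ ?_
        intro acc sn _
        refine pvFoldl_eq_addList_flatMap _ _ _ _ ?_
        intro acc2 n _
        exact ih n (cur ++ sn.1) (len + 1) acc2 hfu

theorem pvMem_addList {x : String} (L : PySem.Set String) (xs : List String) :
    x ∈ pvAddList L xs ↔ x ∈ L ∨ x ∈ xs := by
  induction xs generalizing L with
  | nil => simp [pvAddList]
  | cons y ys ih =>
    have h2 := ih (PySem.Set.add L y)
    simp only [pvAddList, List.foldl_cons] at h2 ⊢
    rw [h2, PySem.Set.mem_add, List.mem_cons]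
    tauto

theorem pvAddList_of_forall_mem {L : PySem.Set String} {xs : List String}
    (h : ∀ x ∈ xs, x ∈ L) : pvAddList L xs = L := by
  induction xs generalizing L with
  | nil => rfl
  | cons y ys ih =>
    have hy := PySem.Set.add_of_mem (h y (by simp))
    simp only [pvAddList, List.foldl, hy] at *
    exact ih (fun x hx => h x (by simp [hx]))

theorem pvContains_ofList (F : List String) (st : String) :
    PySem.Set.contains (PySem.Set.ofList F) st = F.contains st := by
  by_cases h : st ∈ F <;>
    simp [PySem.Set.contains_eq_listContains, PySem.Set.mem_ofList, h]

theorem pvB_main (F : List String) (td : pvTD) (ml : Int) :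
    ∀ (fuel : Nat) (st cur : String) (len : Int) (L : PySem.Set String)
      (V : PySem.Set (String × String × Int)),
      (ml + 1 - len).toNat ≤ fuel →
      (∀ k ∈ V, len ≤ k.2.2 → ∀ x ∈ pvTrace F td ml k.2.1 k.1 k.2.2, x ∈ L) →
      (pvExploreB (PySem.Set.ofList F) td ml fuel st cur len (L, V)).1
          = pvAddList L (pvTrace F td ml st cur len) ∧
      (∀ k ∈ V, k ∈ (pvExploreB (PySem.Set.ofList F) td ml fuel st cur len (L, V)).2) ∧
      (∀ k ∈ (pvExploreB (PySem.Set.ofList F) td ml fuel st cur len (L, V)).2,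
          k ∈ V ∨ len ≤ k.2.2) ∧
      (∀ k ∈ (pvExploreB (PySem.Set.ofList F) td ml fuel st cur len (L, V)).2,
          len ≤ k.2.2 → ∀ x ∈ pvTrace F td ml k.2.1 k.1 k.2.2,
            x ∈ (pvExploreB (PySem.Set.ofList F) td ml fuel st cur len (L, V)).1) := by
  intro fuel
  induction fuel with
  | zero =>
    intro st cur len L V h hInv
    have hlen : len > ml := by omega
    rw [pvTrace, dif_pos hlen]
    exact ⟨rfl, fun k hk => hk, fun k hk => Or.inl hk, fun k hk hl => hInv k hk hl⟩
  | succ fuel ih =>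
    intro st cur len L V h hInv
    by_cases hlen : len > ml
    · have hstop : pvExploreB (PySem.Set.ofList F) td ml (fuel + 1) st cur len (L, V) = (L, V) := by
        simp only [pvExploreB]
        rw [if_pos (by simp [hlen])]
      rw [hstop, pvTrace, dif_pos hlen]
      exact ⟨rfl, fun k hk => hk, fun k hk => Or.inl hk, fun k hk hl => hInv k hk hl⟩
    · by_cases hv : (cur, st, len) ∈ V
      · have hstop : pvExploreB (PySem.Set.ofList F) td ml (fuel + 1) st cur len (L, V) = (L, V) := by
          simp only [pvExploreB]
          rw [if_pos (by simp [hv])]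
        rw [hstop]
        have hsub := hInv (cur, st, len) hv (le_refl len)
        exact ⟨(pvAddList_of_forall_mem hsub).symm, fun k hk => hk, fun k hk => Or.inl hk,
          fun k hk hl => hInv k hk hl⟩
      · -- new configuration: explore it
        have hfu : (ml + 1 - (len + 1)).toNat ≤ fuel := by omega
        set key : String × String × Int := (cur, st, len) with hkey
        set V1 := PySem.Set.add V key with hV1
        set L1 := if F.contains st = true then PySem.Set.add L cur else L with hL1
        -- flatten the nested loop over the transition table into one child list
        set C : List (String × String) :=
          (td.getD st PySem.Dict.empty).items.flatMap
            (fun sn => sn.2.map (fun n => (n, cur ++ sn.1))) with hC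
        have hflat : ∀ (items : List (String × PySem.Set String))
            (acc : PySem.Set String × PySem.Set (String × String × Int)),
            items.foldl (fun acc sn =>
                sn.2.foldl (fun acc n =>
                  pvExploreB (PySem.Set.ofList F) td ml fuel n (cur ++ sn.1) (len + 1) acc) acc) acc
              = (items.flatMap (fun sn => sn.2.map (fun n => (n, cur ++ sn.1)))).foldl
                  (fun acc c => pvExploreB (PySem.Set.ofList F) td ml fuel c.1 c.2 (len + 1) acc) acc := by
          intro items
          induction items with
          | nil => intro acc; rfl
          | cons sn rest ihr =>
            intro acc
            simp only [List.foldl_cons, List.flatMap_cons, List.foldl_append, List.foldl_map, ihr]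
        have hbody : pvExploreB (PySem.Set.ofList F) td ml (fuel + 1) st cur len (L, V)
            = C.foldl (fun acc c => pvExploreB (PySem.Set.ofList F) td ml fuel c.1 c.2 (len + 1) acc)
                (L1, V1) := by
          simp only [pvExploreB]
          rw [if_neg (by
            simp only [Bool.or_eq_true, decide_eq_true_eq]
            rintro (hc | hc)
            · exact hlen hc
            · exact hv ((PySem.Set.contains_iff _ _).mp hc))]
          rw [hflat, pvContains_ofList]
        -- the trace of the current node
        have htr : pvTrace F td ml st cur len
            = (if F.contains st = true then [cur] else [])
                ++ C.flatMap (fun c => pvTrace F td ml c.1 c.2 (len + 1)) := by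
          rw [pvTrace, dif_neg hlen]
          congr 1
          cases hget : td.get? st with
          | none =>
            simp [hC, PySem.Dict.getD, hget, PySem.Dict.empty]
          | some m =>
            simp only [hC, PySem.Dict.getD, hget, Option.getD_some, List.flatMap_assoc,
              List.flatMap_map]
        have hL1' : L1 = pvAddList L (if F.contains st = true then [cur] else []) := by
          by_cases hF : F.contains st = true
          · rw [hL1, if_pos hF, if_pos hF]; rfl
          · rw [hL1, if_neg hF, if_neg hF]; rfl
        -- invariant at depth len+1 for the start accumulator (L1, V1)
        have hI1 : ∀ k ∈ V1, len + 1 ≤ k.2.2 →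
            ∀ x ∈ pvTrace F td ml k.2.1 k.1 k.2.2, x ∈ L1 := by
          intro k hk hl x hx
          rcases (PySem.Set.mem_add V key k).mp hk with hk' | hk'
          · have hxL := hInv k hk' (by omega) x hx
            rw [hL1']
            exact (pvMem_addList _ _).mpr (Or.inl hxL)
          · exfalso; rw [hk'] at hl; simp [hkey] at hl
        -- the fold over the children
        have haux : ∀ (Cs : List (String × String))
            (acc : PySem.Set String × PySem.Set (String × String × Int)),
            (∀ k ∈ acc.2, len + 1 ≤ k.2.2 → ∀ x ∈ pvTrace F td ml k.2.1 k.1 k.2.2, x ∈ acc.1) →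
            (Cs.foldl (fun acc c => pvExploreB (PySem.Set.ofList F) td ml fuel c.1 c.2 (len + 1) acc) acc).1
                = pvAddList acc.1 (Cs.flatMap (fun c => pvTrace F td ml c.1 c.2 (len + 1))) ∧
            (∀ k ∈ acc.2, k ∈ (Cs.foldl (fun acc c => pvExploreB (PySem.Set.ofList F) td ml fuel c.1 c.2 (len + 1) acc) acc).2) ∧
            (∀ k ∈ (Cs.foldl (fun acc c => pvExploreB (PySem.Set.ofList F) td ml fuel c.1 c.2 (len + 1) acc) acc).2,
                k ∈ acc.2 ∨ len + 1 ≤ k.2.2) ∧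
            (∀ k ∈ (Cs.foldl (fun acc c => pvExploreB (PySem.Set.ofList F) td ml fuel c.1 c.2 (len + 1) acc) acc).2,
                len + 1 ≤ k.2.2 → ∀ x ∈ pvTrace F td ml k.2.1 k.1 k.2.2,
                  x ∈ (Cs.foldl (fun acc c => pvExploreB (PySem.Set.ofList F) td ml fuel c.1 c.2 (len + 1) acc) acc).1) := by
          intro Cs
          induction Cs with
          | nil =>
            intro acc hI
            exact ⟨rfl, fun k hk => hk, fun k hk => Or.inl hk, fun k hk hl => hI k hk hl⟩
          | cons c cs ihc =>
            intro acc hI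
            obtain ⟨h1, h2, h3, h4⟩ := ih c.1 c.2 (len + 1) acc.1 acc.2 hfu hI
            simp only [List.foldl_cons]
            have hacc : (acc.1, acc.2) = acc := rfl
            rw [hacc] at h1 h2 h3 h4
            obtain ⟨g1, g2, g3, g4⟩ :=
              ihc (pvExploreB (PySem.Set.ofList F) td ml fuel c.1 c.2 (len + 1) acc) h4
            refine ⟨?_, ?_, ?_, g4⟩
            · rw [g1, h1, List.flatMap_cons, pvAddList_append]
            · exact fun k hk => g2 k (h2 k hk)
            · intro k hk
              rcases g3 k hk with hk' | hk'
              · rcases h3 k hk' with hk'' | hk''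
                · exact Or.inl hk''
                · exact Or.inr hk''
              · exact Or.inr hk'
        obtain ⟨h1, h2, h3, h4⟩ := haux C (L1, V1) hI1
        rw [hbody, htr]
        refine ⟨?_, ?_, ?_, ?_⟩
        · rw [h1, hL1', ← pvAddList_append]
        · intro k hk
          exact h2 k ((PySem.Set.mem_add V key k).mpr (Or.inl hk))
        · intro k hk
          rcases h3 k hk with hk' | hk'
          · rcases (PySem.Set.mem_add V key k).mp hk' with hk'' | hk''
            · exact Or.inl hk''
            · right; rw [hk'']
          · right; omega
        · intro k hk hl x hx
          have hR1 : (C.foldl (fun acc c => pvExploreB (PySem.Set.ofList F) td ml fuel c.1 c.2 (len + 1) acc) (L1, V1)).1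
              = pvAddList L ((if F.contains st = true then [cur] else [])
                  ++ C.flatMap (fun c => pvTrace F td ml c.1 c.2 (len + 1))) := by
            rw [h1, hL1', ← pvAddList_append]
          rcases h3 k hk with hk' | hk'
          · rcases (PySem.Set.mem_add V key k).mp hk' with hk'' | hk''
            · have hxL := hInv k hk'' hl x hx
              rw [hR1]
              exact (pvMem_addList _ _).mpr (Or.inl hxL)
            · rw [hR1]
              refine (pvMem_addList _ _).mpr (Or.inr ?_)
              rw [hk''] at hx
              simp only [hkey] at hx
              rw [← htr]
              exact hx
          · exact h4 k hk hk' x hx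

-- the two table builds compute the same table
theorem pvBuild_eq (transitions : List (String × String × String)) :
    pvBuildA transitions = pvBuildB transitions := by
  unfold pvBuildA pvBuildB
  exact PySem.List.foldl_congr_mem _ _ _ _ (fun acc t _ => pvStep_eq acc t)

-- ===== VERDICT (by name: the statement is the Claim_ definition above) =====
theorem generate_nfa_strings_spec : Claim_equal_generate_nfa_strings := by
  intro F transitions ml _
  unfold Spec_generate_nfa_strings generate_nfa_strings generate_nfa_strings_alt
  rw [pvBuild_eq]
  rw [pvA_eq_trace F (pvBuildB transitions) ml _ _ _ _ _ (by omega)]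
  rw [(pvB_main F (pvBuildB transitions) ml ((ml + 1).toNat + 1) "k1" "" 0
        PySem.Set.empty PySem.Set.empty (by omega) (by intro k hk; cases hk)).1]
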